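-- pv_equiv track=rewrite | github.com/Pixelatory/cosc4f90 | Python/testing.py | followsRules
-- ===== SOURCE A (Python) =====
-- def followsRules(x):
--     if (x[3] * 10) + x[9] > (x[8] * 10) + x[3]:  # If DK > JD is true, then false
--         return False
--     elif x[4] > x[9]:  # If E > K is true, then false
--         return False
--     elif (x[4] * 100) + (x[3] * 10) + x[1] > (x[3] * 100) + (x[9] * 10) + x[7]:  # If EDB > DKH is true, then false
--         return False
--     elif 1 > x[8]:  # If 1 > J is true, then false
--         return False
--     elif (x[9] * 10) + x[5] > (x[3] * 10) + x[9]:  # If KF > DK is true, then false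
--         return False
--     elif (x[4] * 1000) + (x[7] * 100) + (x[2] * 10) + x[6] > (x[4] * 1000) + (x[4] * 1000) + (x[0] * 10) + x[
--         4]:  # if EHCG > EEAE is true, then false
--         return False
--     elif x[4] == 0:  # if E = 0 is true, then false
--         return False
--
--     # Now, checking that no two values are the same in x
--     for j in range(len(x)):
--         for i in range(len(x)):
--             if i != j and x[i] == x[j]:
--                 return False
--
--     return True
-- ===== SOURCE B (Python) =====
-- # Table-driven constraint check plus sort-based uniqueness test.
-- # Each rule is (lhs_weights, lhs_const, rhs_weights, rhs_const): the rule holds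
-- # when sum(w*x[i]) + const on the left is <= the same on the right.
-- _RULES = [
--     ((0, 0, 0, 10, 0, 0, 0, 0, 0, 1), 0, (0, 0, 0, 1, 0, 0, 0, 0, 10, 0), 0),   # DK <= JD
--     ((0, 0, 0, 0, 1, 0, 0, 0, 0, 0), 0, (0, 0, 0, 0, 0, 0, 0, 0, 0, 1), 0),    # E <= K
--     ((0, 1, 0, 10, 100, 0, 0, 0, 0, 0), 0, (0, 0, 0, 100, 0, 0, 0, 1, 0, 10), 0),  # EDB <= DKH
--     ((0, 0, 0, 0, 0, 0, 0, 0, 0, 0), 1, (0, 0, 0, 0, 0, 0, 0, 0, 1, 0), 0),    # 1 <= J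
--     ((0, 0, 0, 0, 0, 1, 0, 0, 0, 10), 0, (0, 0, 0, 10, 0, 0, 0, 0, 0, 1), 0),  # KF <= DK
--     ((0, 0, 10, 0, 1000, 0, 1, 100, 0, 0), 0, (10, 0, 0, 0, 2001, 0, 0, 0, 0, 0), 0),  # EHCG <= EEAE
-- ]
--
--
-- def followsRules(x):
--     for lw, lc, rw, rc in _RULES:
--         lhs = lc + sum(w * x[i] for i, w in enumerate(lw))
--         rhs = rc + sum(w * x[i] for i, w in enumerate(rw))
--         if lhs > rhs:
--             return False
--     if x[4] == 0:
--         return False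
--     s = sorted(x)
--     for t in range(len(s) - 1):
--         if s[t] == s[t + 1]:
--             return False
--     return True
-- ===== Notes on version B (the rewrite author's own statement) =====
-- stated objective: alternative
-- what changed: Replaces the hard-coded seven-branch elif chain with a data-driven loop over a table of weighted-sum constraints, and replaces the all-pairs nested duplicate scan with sort-then-adjacent-compare uniqueness.
import Mathlib
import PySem

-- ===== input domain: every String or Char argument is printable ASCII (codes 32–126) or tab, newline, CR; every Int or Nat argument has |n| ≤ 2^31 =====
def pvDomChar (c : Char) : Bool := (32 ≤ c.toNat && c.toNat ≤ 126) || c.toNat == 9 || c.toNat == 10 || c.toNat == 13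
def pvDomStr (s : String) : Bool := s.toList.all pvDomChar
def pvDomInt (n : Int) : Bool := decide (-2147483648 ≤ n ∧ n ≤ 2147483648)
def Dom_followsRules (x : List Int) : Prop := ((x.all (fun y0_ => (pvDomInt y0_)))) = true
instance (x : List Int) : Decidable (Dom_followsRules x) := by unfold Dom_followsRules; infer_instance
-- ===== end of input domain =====

-- B restructures A: a data-driven loop over a table of weighted-sum constraints replaces the
-- hard-coded elif chain, and a sort-then-adjacent-compare pass replaces the all-pairs duplicate scan.

-- ===== PORT A =====
-- literal transliteration of A's elif chain and nested duplicate scan (pyGetD is total under Pre_)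
def followsRules (x : List Int) : Bool :=
  if (PySem.List.pyGetD x 3 0) * 10 + PySem.List.pyGetD x 9 0 >
      (PySem.List.pyGetD x 8 0) * 10 + PySem.List.pyGetD x 3 0 then false
  else if PySem.List.pyGetD x 4 0 > PySem.List.pyGetD x 9 0 then false
  else if (PySem.List.pyGetD x 4 0) * 100 + (PySem.List.pyGetD x 3 0) * 10 + PySem.List.pyGetD x 1 0 >
      (PySem.List.pyGetD x 3 0) * 100 + (PySem.List.pyGetD x 9 0) * 10 + PySem.List.pyGetD x 7 0 then false
  else if 1 > PySem.List.pyGetD x 8 0 then false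
  else if (PySem.List.pyGetD x 9 0) * 10 + PySem.List.pyGetD x 5 0 >
      (PySem.List.pyGetD x 3 0) * 10 + PySem.List.pyGetD x 9 0 then false
  else if (PySem.List.pyGetD x 4 0) * 1000 + (PySem.List.pyGetD x 7 0) * 100 +
      (PySem.List.pyGetD x 2 0) * 10 + PySem.List.pyGetD x 6 0 >
      (PySem.List.pyGetD x 4 0) * 1000 + (PySem.List.pyGetD x 4 0) * 1000 +
      (PySem.List.pyGetD x 0 0) * 10 + PySem.List.pyGetD x 4 0 then false
  else if PySem.List.pyGetD x 4 0 = 0 then false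
  else if (PySem.List.pyRange 0 (PySem.List.len x) 1).any (fun j =>
      (PySem.List.pyRange 0 (PySem.List.len x) 1).any (fun i =>
        decide (i ≠ j) && decide (PySem.List.pyGetD x i 0 = PySem.List.pyGetD x j 0))) then false
  else true

-- ===== PORT B =====
-- transliteration of Source B: the constraint table, then the loop over it, then sort + adjacent scan
def rulesTable : List (List Int × Int × List Int × Int) :=
  [([0, 0, 0, 10, 0, 0, 0, 0, 0, 1], 0, [0, 0, 0, 1, 0, 0, 0, 0, 10, 0], 0),
   ([0, 0, 0, 0, 1, 0, 0, 0, 0, 0], 0, [0, 0, 0, 0, 0, 0, 0, 0, 0, 1], 0),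
   ([0, 1, 0, 10, 100, 0, 0, 0, 0, 0], 0, [0, 0, 0, 100, 0, 0, 0, 1, 0, 10], 0),
   ([0, 0, 0, 0, 0, 0, 0, 0, 0, 0], 1, [0, 0, 0, 0, 0, 0, 0, 0, 1, 0], 0),
   ([0, 0, 0, 0, 0, 1, 0, 0, 0, 10], 0, [0, 0, 0, 10, 0, 0, 0, 0, 0, 1], 0),
   ([0, 0, 10, 0, 1000, 0, 1, 100, 0, 0], 0, [10, 0, 0, 0, 2001, 0, 0, 0, 0, 0], 0)]

-- sum(w * x[i] for i, w in enumerate(ws))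
def weightedSum (ws : List Int) (x : List Int) : Int :=
  ((PySem.List.enumerate ws).map (fun p => p.2 * PySem.List.pyGetD x p.1 0)).sum

def followsRules_alt (x : List Int) : Bool :=
  if rulesTable.any (fun r =>
      decide (r.2.1 + weightedSum r.1 x > r.2.2.2 + weightedSum r.2.2.1 x)) then false
  else if PySem.List.pyGetD x 4 0 = 0 then false
  else
    let s := PySem.List.sorted x (fun v => v) false
    if (PySem.List.pyRange 0 ((PySem.List.len s) - 1) 1).any (fun t =>
        decide (PySem.List.pyGetD s t 0 = PySem.List.pyGetD s (t + 1) 0)) then false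
    else true

-- ===== PRECONDITION & SPEC =====
-- A indexes ten fixed positions; on lists shorter than ten it raises IndexError, so those are excluded.
def Pre_followsRules (x : List Int) : Prop := 10 ≤ x.length
instance (x : List Int) : Decidable (Pre_followsRules x) := by unfold Pre_followsRules; infer_instance
def pvWitness_followsRules : List Int := [0, 1, 2, 3, 4, 5, 6, 7, 8, 9]

def Spec_followsRules (x : List Int) (out : Bool) : Prop := out = followsRules_alt x
instance (x : List Int) (out : Bool) : Decidable (Spec_followsRules x out) := by unfold Spec_followsRules; infer_instance

-- ===== CLAIM =====
def Claim_equal_followsRules : Prop := ∀ (x : List Int), Dom_followsRules x → Pre_followsRules x → Spec_followsRules x (followsRules x)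

-- ===== LEMMAS AND PROOFS =====

-- A's nested scan fires ↔ x has a duplicate
theorem dupScan_iff (x : List Int) :
    ((PySem.List.pyRange 0 (x.length : Int) 1).any (fun j =>
      (PySem.List.pyRange 0 (x.length : Int) 1).any (fun i =>
        !decide (i = j) && decide (PySem.List.pyGetD x i 0 = PySem.List.pyGetD x j 0))) = true)
    ↔ ¬ x.Nodup := by
  rw [List.any_eq_true]
  constructor
  · rintro ⟨j, hj, hinner⟩
    rw [List.any_eq_true] at hinner
    obtain ⟨i, hi, hcond⟩ := hinner
    simp only [Bool.and_eq_true, Bool.not_eq_eq_eq_not, Bool.not_true, decide_eq_false_iff_not,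
      decide_eq_true_eq] at hcond
    rw [PySem.List.mem_pyRange_one] at hi hj
    intro hnd
    have hgi := PySem.List.pyGetD_eq_getElem x (i := i) 0 hi.1 hi.2
    have hgj := PySem.List.pyGetD_eq_getElem x (i := j) 0 hj.1 hj.2
    have heq : x[i.toNat]'(by omega) = x[j.toNat]'(by omega) := by
      rw [← hgi, ← hgj]; exact hcond.2
    have := (List.Nodup.getElem_inj_iff hnd).mp heq
    exact hcond.1 (by omega)
  · intro hnd
    rw [List.nodup_iff_getElem?_ne_getElem?] at hnd
    push Not at hnd
    obtain ⟨i, j, hij, hj, heq⟩ := hnd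
    have hi : i < x.length := by omega
    refine ⟨(j : Int), ?_, ?_⟩
    · rw [PySem.List.mem_pyRange_one]; constructor <;> omega
    · rw [List.any_eq_true]
      refine ⟨(i : Int), ?_, ?_⟩
      · rw [PySem.List.mem_pyRange_one]; constructor <;> omega
      · have hgi := PySem.List.pyGetD_eq_getElem x (i := (i : Int)) 0 (by omega) (by omega)
        have hgj := PySem.List.pyGetD_eq_getElem x (i := (j : Int)) 0 (by omega) (by omega)
        simp only [Int.toNat_natCast] at hgi hgj
        have heq' : x[i] = x[j] := by
          simpa [List.getElem?_eq_getElem, hi, hj] using heq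
        simp [hgi, hgj, heq']
        omega

-- B's adjacent scan over the sorted copy fires ↔ x has a duplicate
theorem adjScan_iff (x : List Int) :
    ((PySem.List.pyRange 0 (((PySem.List.sorted x (fun v => v) false).length : Int) - 1) 1).any (fun t =>
      decide (PySem.List.pyGetD (PySem.List.sorted x (fun v => v) false) t 0 =
              PySem.List.pyGetD (PySem.List.sorted x (fun v => v) false) (t + 1) 0)) = true)
    ↔ ¬ x.Nodup := by
  have hperm : (PySem.List.sorted x (fun v => v) false).Perm x := PySem.List.sorted_perm x _ _
  have hpw : (PySem.List.sorted x (fun v => v) false).Pairwise (fun a b => a ≤ b) :=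
    PySem.List.sorted_pairwise x _
  set s := PySem.List.sorted x (fun v => v) false with hs
  have hlen : s.length = x.length := hperm.length_eq
  rw [List.any_eq_true]
  constructor
  · rintro ⟨t, ht, heq⟩
    rw [PySem.List.mem_pyRange_one] at ht
    simp only [decide_eq_true_eq] at heq
    have h1 := PySem.List.pyGetD_eq_getElem s (i := t) 0 ht.1 (by omega)
    have h2 := PySem.List.pyGetD_eq_getElem s (i := t + 1) 0 (by omega) (by omega)
    intro hnd
    have hnds : s.Nodup := hperm.symm.nodup hnd
    have heq' : s[t.toNat]'(by omega) = s[(t+1).toNat]'(by omega) := by rw [← h1, ← h2]; exact heq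
    have := (List.Nodup.getElem_inj_iff hnds).mp heq'
    omega
  · intro hnd
    by_contra hno
    apply hnd
    apply hperm.nodup
    have hadj : ∀ (i : Nat) (h : i + 1 < s.length), s[i] < s[i + 1] := by
      intro i h
      have hle : s[i] ≤ s[i+1] := List.pairwise_iff_getElem.mp hpw i (i+1) (by omega) h (by omega)
      rcases lt_or_eq_of_le hle with h' | h'
      · exact h'
      · exfalso; apply hno
        refine ⟨(i : Int), ?_, ?_⟩
        · rw [PySem.List.mem_pyRange_one]; constructor <;> omega
        · have h1 := PySem.List.pyGetD_eq_getElem s (i := (i : Int)) 0 (by omega) (by simp; omega)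
          have hc : (i : Int) + 1 = ((i + 1 : Nat) : Int) := by push_cast; ring
          have h2 := PySem.List.pyGetD_eq_getElem s (i := ((i + 1 : Nat) : Int)) 0 (by omega) (by simp; omega)
          simp only [Int.toNat_natCast] at h1 h2
          rw [hc, h1, h2, h']
          simp
    have : s.Pairwise (· < ·) := List.pairwise_iff_getElem.mpr (by
      intro i j hi hj hij
      have : ∀ k, ∀ (hk : i + k + 1 ≤ j) , s[i] < s[i + k + 1]'(by omega) := by
        intro k
        induction k with
        | zero => intro hk; exact hadj i (by omega)
        | succ n ih =>
          intro hk
          exact lt_trans (ih (by omega)) (by have := hadj (i + n + 1) (by omega); simpa [Nat.add_assoc] using this)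
      have h := this (j - i - 1) (by omega)
      have hji : i + (j - i - 1) + 1 = j := by omega
      simpa [hji] using h)
    exact this.nodup

theorem scan_eq (x : List Int) :
    ((PySem.List.pyRange 0 (x.length : Int) 1).any (fun j =>
      (PySem.List.pyRange 0 (x.length : Int) 1).any (fun i =>
        !decide (i = j) && decide (PySem.List.pyGetD x i 0 = PySem.List.pyGetD x j 0))))
    = ((PySem.List.pyRange 0 (((PySem.List.sorted x (fun v => v) false).length : Int) - 1) 1).any (fun t =>
      decide (PySem.List.pyGetD (PySem.List.sorted x (fun v => v) false) t 0 =
              PySem.List.pyGetD (PySem.List.sorted x (fun v => v) false) (t + 1) 0))) := by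
  by_cases h : x.Nodup
  · have h1 := (dupScan_iff x).not.mpr (not_not.mpr h)
    have h2 := (adjScan_iff x).not.mpr (not_not.mpr h)
    simp only [Bool.not_eq_true] at h1 h2
    rw [h1, h2]
  · rw [(dupScan_iff x).mpr h, (adjScan_iff x).mpr h]

-- ===== VERDICT =====
theorem followsRules_spec : Claim_equal_followsRules := by
  intro x _ hpre
  have hscan := scan_eq x
  rcases x with _ | ⟨a0, _ | ⟨a1, _ | ⟨a2, _ | ⟨a3, _ | ⟨a4, _ | ⟨a5, _ | ⟨a6, _ | ⟨a7, _ | ⟨a8, _ | ⟨a9, r⟩⟩⟩⟩⟩⟩⟩⟩⟩⟩ <;>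
    first
    | (exfalso; unfold Pre_followsRules at hpre; simp at hpre; done)
    | skip
  unfold Spec_followsRules followsRules followsRules_alt
  simp only [rulesTable, weightedSum, List.any_cons, List.any_nil, PySem.List.len_eq] at hscan ⊢
  norm_num [PySem.List.enumerate, PySem.List.pyGetD_ofNat', decide_not] at hscan ⊢
  rw [hscan]
  rw [Bool.eq_iff_iff]
  simp
  constructor
  · rintro ⟨h1, h2, h3, h4, h5, h6, h7, h8⟩
    exact ⟨⟨by omega, by omega, by omega, by omega, by omega, by omega⟩, h7, h8⟩
  · rintro ⟨⟨h1, h2, h3, h4, h5, h6⟩, h7, h8⟩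
    exact ⟨by omega, by omega, by omega, by omega, by omega, by omega, h7, h8⟩
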